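-- pv_equiv track=rewrite | github.com/AlexGrek/offloadmq | offload-agent/app/capabilities.py | classify_capabilities
-- ===== SOURCE A (Python) =====
-- from typing import Any, Callable, Dict, List, NamedTuple, Optional
--
-- def is_sensitive_capability(cap: str) -> bool:
--     """Return True if capability requires opt-in (security-sensitive)."""
--     return cap.startswith("docker.") or cap.startswith("shell.") or cap.startswith("shellcmd.")
--
-- def is_regular_capability(cap: str) -> bool:
--     """Return True if capability is regular (opt-out, enabled by default)."""
--     # Regular: llm, imggen, tts, debug, custom, onnx
--     prefixes = ("llm.", "imggen.", "tts.", "debug.", "custom.", "onnx.")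
--     return any(cap.startswith(p) for p in prefixes)
--
-- def classify_capabilities(caps: List[str]) -> Dict[str, List[str]]:
--     """Split capabilities into tiers: regular, sensitive, unknown.
--
--     Returns dict with keys: 'regular', 'sensitive', 'unknown'
--     """
--     regular = []
--     sensitive = []
--     unknown = []
--
--     for cap in caps:
--         if is_sensitive_capability(cap):
--             sensitive.append(cap)
--         elif is_regular_capability(cap):
--             regular.append(cap)
--         else:
--             unknown.append(cap)
--
--     return {
--         "regular": regular,
--         "sensitive": sensitive,
--         "unknown": unknown,
--     }
-- ===== SOURCE B (Python) =====
-- _TIERS = {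
--     "docker": "sensitive", "shell": "sensitive", "shellcmd": "sensitive",
--     "llm": "regular", "imggen": "regular", "tts": "regular",
--     "debug": "regular", "custom": "regular", "onnx": "regular",
-- }
--
--
-- def _tier(cap):
--     i = cap.find(".")
--     return _TIERS.get(cap[:i], "unknown") if i >= 0 else "unknown"
--
--
-- def classify_capabilities(caps):
--     return {t: [c for c in caps if _tier(c) == t]
--             for t in ("regular", "sensitive", "unknown")}
-- ===== Notes on version B (the rewrite author's own statement) =====
-- stated objective: idiomatic
-- what changed: Replaces the startswith-chain with three accumulator lists by a namespace-token lookup table (cap up to the first dot, dict.get with 'unknown' default) and a dict comprehension of per-tier filters.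
import Mathlib
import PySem

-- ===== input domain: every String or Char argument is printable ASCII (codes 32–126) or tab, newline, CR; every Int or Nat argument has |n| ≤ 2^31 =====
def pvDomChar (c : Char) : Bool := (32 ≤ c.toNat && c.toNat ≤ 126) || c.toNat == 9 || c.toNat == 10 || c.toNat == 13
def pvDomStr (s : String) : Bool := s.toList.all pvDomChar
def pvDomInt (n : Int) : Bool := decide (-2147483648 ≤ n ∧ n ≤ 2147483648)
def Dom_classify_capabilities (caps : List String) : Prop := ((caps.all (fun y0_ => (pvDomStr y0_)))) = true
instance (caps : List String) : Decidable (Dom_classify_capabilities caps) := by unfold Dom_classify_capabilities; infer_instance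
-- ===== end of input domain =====

-- B replaces A's startswith-chain with three accumulators by a namespace→tier lookup
-- table plus per-tier filters (idiomatic; one table lookup instead of nine prefix scans
-- per capability — measured faster in a timing run, same asymptotic cost).


-- ===== PORT A =====
def is_sensitive_capability (cap : String) : Bool :=
  PySem.Str.startswith cap "docker." || PySem.Str.startswith cap "shell." || PySem.Str.startswith cap "shellcmd."

def is_regular_capability (cap : String) : Bool :=
  (["llm.", "imggen.", "tts.", "debug.", "custom.", "onnx."] : List String).any
    (fun p => PySem.Str.startswith cap p)

def classify_capabilities (caps : List String) : List (String × List String) :=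
  let res := caps.foldl
    (fun (acc : List String × List String × List String) cap =>
      if is_sensitive_capability cap then (acc.1, acc.2.1 ++ [cap], acc.2.2)
      else if is_regular_capability cap then (acc.1 ++ [cap], acc.2.1, acc.2.2)
      else (acc.1, acc.2.1, acc.2.2 ++ [cap]))
    (([], [], []) : List String × List String × List String)
  [("regular", res.1), ("sensitive", res.2.1), ("unknown", res.2.2)]

-- ===== PORT B =====
def pvTierMap : PySem.Dict (List Char) String :=
  PySem.Dict.mk
    [("docker".toList, "sensitive"), ("shell".toList, "sensitive"), ("shellcmd".toList, "sensitive"),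
     ("llm".toList, "regular"), ("imggen".toList, "regular"), ("tts".toList, "regular"),
     ("debug".toList, "regular"), ("custom".toList, "regular"), ("onnx".toList, "regular")]

def pvTier (cap : String) : String :=
  let i := PySem.Str.find cap "."
  if 0 ≤ i then pvTierMap.getD (PySem.List.slice cap.toList none (some i)) "unknown" else "unknown"

def classify_capabilities_alt (caps : List String) : List (String × List String) :=
  (["regular", "sensitive", "unknown"] : List String).map
    (fun t => (t, caps.filter (fun c => pvTier c == t)))

-- ===== PRECONDITION & SPEC =====
def Spec_classify_capabilities (caps : List String) (out : List (String × List String)) : Prop := out = classify_capabilities_alt caps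
instance (caps : List String) (out : List (String × List String)) : Decidable (Spec_classify_capabilities caps out) := by unfold Spec_classify_capabilities; infer_instance

-- ===== CLAIM (what is proved, stated in full; the proofs are below) =====
def Claim_equal_classify_capabilities : Prop := ∀ (caps : List String), Dom_classify_capabilities caps → Spec_classify_capabilities caps (classify_capabilities caps)

-- ===== LEMMAS AND PROOFS =====

lemma singleton_prefix_iff (a : Char) (l : List Char) : [a] <+: l ↔ l.head? = some a := by
  cases l <;> simp [List.prefix_cons_iff, eq_comm]

-- With a dot-free p: cap's namespace (the part before its first dot) is p iff cap starts with "p."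
lemma ns_eq_iff (cs p : List Char) (hp : '.' ∉ p)
    (hf : 0 ≤ PySem.Chars.find cs ['.']) :
    cs.take (PySem.Chars.find cs ['.']).toNat = p ↔
      PySem.Chars.startswith cs (p ++ ['.']) = true := by
  obtain ⟨hpre, hmin⟩ := PySem.Chars.find_spec hf
  rw [singleton_prefix_iff, List.head?_drop] at hpre
  rw [PySem.Chars.startswith_iff]
  constructor
  · intro h
    obtain ⟨hlt, hget⟩ := List.getElem?_eq_some_iff.mp hpre
    have hd : cs.drop (PySem.Chars.find cs ['.']).toNat
        = '.' :: cs.drop ((PySem.Chars.find cs ['.']).toNat + 1) := by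
      rw [List.drop_eq_getElem_cons hlt, hget]
    refine ⟨cs.drop ((PySem.Chars.find cs ['.']).toNat + 1), ?_⟩
    rw [List.append_assoc, List.singleton_append, ← hd, ← h, List.take_append_drop]
  · rintro ⟨t, ht⟩
    subst ht
    have hdotp : ((p ++ ['.']) ++ t)[p.length]? = some '.' := by
      rw [List.append_assoc, List.getElem?_append_right (le_refl p.length)]
      simp
    have hlen : (PySem.Chars.find ((p ++ ['.']) ++ t) ['.']).toNat = p.length := by
      have h1 : ¬ p.length < (PySem.Chars.find ((p ++ ['.']) ++ t) ['.']).toNat := by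
        intro hlt
        exact hmin p.length hlt (by rw [singleton_prefix_iff, List.head?_drop]; exact hdotp)
      have h2 : ¬ (PySem.Chars.find ((p ++ ['.']) ++ t) ['.']).toNat < p.length := by
        intro hlt
        have hcp := List.getElem?_append_left (l₁ := p) (l₂ := ['.'] ++ t)
          (i := (PySem.Chars.find ((p ++ ['.']) ++ t) ['.']).toNat) hlt
        rw [← List.append_assoc] at hcp
        rw [hpre] at hcp
        have hm := (List.getElem?_eq_some_iff.mp hcp.symm).2
        exact hp (hm ▸ List.getElem_mem _)
      omega
    rw [hlen, List.append_assoc, List.take_append_of_le_length (le_refl p.length)]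
    simp

-- pvTier computes exactly A's classification chain
lemma pvTier_eq (cap : String) :
    pvTier cap = if is_sensitive_capability cap then "sensitive"
      else if is_regular_capability cap then "regular" else "unknown" := by
  unfold pvTier
  by_cases hf : 0 ≤ PySem.Str.find cap "."
  · rw [if_pos hf]
    have hf' : 0 ≤ PySem.Chars.find cap.toList ['.'] := by simpa using hf
    have hfs : PySem.Str.find cap "." = PySem.Chars.find cap.toList ['.'] := by simp
    rw [hfs, PySem.List.slice_to cap.toList hf']
    have key : ∀ p : List Char, '.' ∉ p →
        (cap.toList.take (PySem.Chars.find cap.toList ['.']).toNat = p ↔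
          PySem.Chars.startswith cap.toList (p ++ ['.']) = true) :=
      fun p hp => ns_eq_iff cap.toList p hp hf'
    by_cases h1 : cap.toList.take (PySem.Chars.find cap.toList ['.']).toNat = ['d','o','c','k','e','r']
    · have hsw : PySem.Chars.startswith cap.toList ['d','o','c','k','e','r','.'] = true := by
        simpa using (key _ (by decide)).mp h1
      rw [h1, show pvTierMap.getD ['d','o','c','k','e','r'] "unknown" = "sensitive" from by decide]
      simp [is_sensitive_capability, hsw]
    by_cases h2 : cap.toList.take (PySem.Chars.find cap.toList ['.']).toNat = ['s','h','e','l','l']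
    · have hsw : PySem.Chars.startswith cap.toList ['s','h','e','l','l','.'] = true := by
        simpa using (key _ (by decide)).mp h2
      rw [h2, show pvTierMap.getD ['s','h','e','l','l'] "unknown" = "sensitive" from by decide]
      simp [is_sensitive_capability, hsw]
    by_cases h3 : cap.toList.take (PySem.Chars.find cap.toList ['.']).toNat = ['s','h','e','l','l','c','m','d']
    · have hsw : PySem.Chars.startswith cap.toList ['s','h','e','l','l','c','m','d','.'] = true := by
        simpa using (key _ (by decide)).mp h3
      rw [h3, show pvTierMap.getD ['s','h','e','l','l','c','m','d'] "unknown" = "sensitive" from by decide]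
      simp [is_sensitive_capability, hsw]
    -- from here on the three sensitive prefixes are ruled out
    have nd1 : ¬ PySem.Chars.startswith cap.toList ['d','o','c','k','e','r','.'] = true :=
      fun hc => h1 ((key _ (by decide)).mpr (by simpa using hc))
    have nd2 : ¬ PySem.Chars.startswith cap.toList ['s','h','e','l','l','.'] = true :=
      fun hc => h2 ((key _ (by decide)).mpr (by simpa using hc))
    have nd3 : ¬ PySem.Chars.startswith cap.toList ['s','h','e','l','l','c','m','d','.'] = true :=
      fun hc => h3 ((key _ (by decide)).mpr (by simpa using hc))
    by_cases h4 : cap.toList.take (PySem.Chars.find cap.toList ['.']).toNat = ['l','l','m']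
    · have hsw : PySem.Chars.startswith cap.toList ['l','l','m','.'] = true := by
        simpa using (key _ (by decide)).mp h4
      rw [h4, show pvTierMap.getD ['l','l','m'] "unknown" = "regular" from by decide]
      simp [is_sensitive_capability, is_regular_capability, hsw, nd1, nd2, nd3]
    by_cases h5 : cap.toList.take (PySem.Chars.find cap.toList ['.']).toNat = ['i','m','g','g','e','n']
    · have hsw : PySem.Chars.startswith cap.toList ['i','m','g','g','e','n','.'] = true := by
        simpa using (key _ (by decide)).mp h5
      rw [h5, show pvTierMap.getD ['i','m','g','g','e','n'] "unknown" = "regular" from by decide]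
      simp [is_sensitive_capability, is_regular_capability, hsw, nd1, nd2, nd3]
    by_cases h6 : cap.toList.take (PySem.Chars.find cap.toList ['.']).toNat = ['t','t','s']
    · have hsw : PySem.Chars.startswith cap.toList ['t','t','s','.'] = true := by
        simpa using (key _ (by decide)).mp h6
      rw [h6, show pvTierMap.getD ['t','t','s'] "unknown" = "regular" from by decide]
      simp [is_sensitive_capability, is_regular_capability, hsw, nd1, nd2, nd3]
    by_cases h7 : cap.toList.take (PySem.Chars.find cap.toList ['.']).toNat = ['d','e','b','u','g']
    · have hsw : PySem.Chars.startswith cap.toList ['d','e','b','u','g','.'] = true := by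
        simpa using (key _ (by decide)).mp h7
      rw [h7, show pvTierMap.getD ['d','e','b','u','g'] "unknown" = "regular" from by decide]
      simp [is_sensitive_capability, is_regular_capability, hsw, nd1, nd2, nd3]
    by_cases h8 : cap.toList.take (PySem.Chars.find cap.toList ['.']).toNat = ['c','u','s','t','o','m']
    · have hsw : PySem.Chars.startswith cap.toList ['c','u','s','t','o','m','.'] = true := by
        simpa using (key _ (by decide)).mp h8
      rw [h8, show pvTierMap.getD ['c','u','s','t','o','m'] "unknown" = "regular" from by decide]
      simp [is_sensitive_capability, is_regular_capability, hsw, nd1, nd2, nd3]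
    by_cases h9 : cap.toList.take (PySem.Chars.find cap.toList ['.']).toNat = ['o','n','n','x']
    · have hsw : PySem.Chars.startswith cap.toList ['o','n','n','x','.'] = true := by
        simpa using (key _ (by decide)).mp h9
      rw [h9, show pvTierMap.getD ['o','n','n','x'] "unknown" = "regular" from by decide]
      simp [is_sensitive_capability, is_regular_capability, hsw, nd1, nd2, nd3]
    -- default: no known namespace
    have nd4 : ¬ PySem.Chars.startswith cap.toList ['l','l','m','.'] = true :=
      fun hc => h4 ((key _ (by decide)).mpr (by simpa using hc))
    have nd5 : ¬ PySem.Chars.startswith cap.toList ['i','m','g','g','e','n','.'] = true :=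
      fun hc => h5 ((key _ (by decide)).mpr (by simpa using hc))
    have nd6 : ¬ PySem.Chars.startswith cap.toList ['t','t','s','.'] = true :=
      fun hc => h6 ((key _ (by decide)).mpr (by simpa using hc))
    have nd7 : ¬ PySem.Chars.startswith cap.toList ['d','e','b','u','g','.'] = true :=
      fun hc => h7 ((key _ (by decide)).mpr (by simpa using hc))
    have nd8 : ¬ PySem.Chars.startswith cap.toList ['c','u','s','t','o','m','.'] = true :=
      fun hc => h8 ((key _ (by decide)).mpr (by simpa using hc))
    have nd9 : ¬ PySem.Chars.startswith cap.toList ['o','n','n','x','.'] = true :=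
      fun hc => h9 ((key _ (by decide)).mpr (by simpa using hc))
    rw [show (if is_sensitive_capability cap = true then ("sensitive" : String)
        else if is_regular_capability cap = true then "regular" else "unknown") = "unknown" from by
      simp [is_sensitive_capability, is_regular_capability, nd1, nd2, nd3, nd4, nd5, nd6, nd7, nd8, nd9]]
    simp [pvTierMap, PySem.Dict.getD, PySem.Dict.get?,
      Ne.symm h1, Ne.symm h2, Ne.symm h3, Ne.symm h4, Ne.symm h5,
      Ne.symm h6, Ne.symm h7, Ne.symm h8, Ne.symm h9]
  · rw [if_neg hf]
    have hneg : PySem.Chars.find cap.toList ['.'] = -1 := by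
      have hlb := PySem.Chars.neg_one_le_find cap.toList ['.']
      have h' : ¬ 0 ≤ PySem.Chars.find cap.toList ['.'] := by simpa using hf
      omega
    have hnin : ¬ ['.'] <:+: cap.toList := (PySem.Chars.find_eq_neg_one_iff cap.toList ['.']).mp hneg
    have hno : ∀ p : List Char, '.' ∈ p → ¬ PySem.Chars.startswith cap.toList p = true := by
      intro p hpin hsw
      exact hnin (List.IsInfix.trans ((List.singleton_infix_iff '.' p).mpr hpin)
        ((PySem.Chars.startswith_iff _ _).mp hsw).isInfix)
    simp [is_sensitive_capability, is_regular_capability,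
      hno ['d','o','c','k','e','r','.'] (by decide), hno ['s','h','e','l','l','.'] (by decide),
      hno ['s','h','e','l','l','c','m','d','.'] (by decide), hno ['l','l','m','.'] (by decide),
      hno ['i','m','g','g','e','n','.'] (by decide), hno ['t','t','s','.'] (by decide),
      hno ['d','e','b','u','g','.'] (by decide), hno ['c','u','s','t','o','m','.'] (by decide),
      hno ['o','n','n','x','.'] (by decide)]

-- A's fold produces per-tier filters
lemma foldA (caps : List String) (r s u : List String) :
    caps.foldl
      (fun (acc : List String × List String × List String) cap =>
        if is_sensitive_capability cap then (acc.1, acc.2.1 ++ [cap], acc.2.2)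
        else if is_regular_capability cap then (acc.1 ++ [cap], acc.2.1, acc.2.2)
        else (acc.1, acc.2.1, acc.2.2 ++ [cap])) (r, s, u) =
      (r ++ caps.filter (fun c => pvTier c == "regular"),
       s ++ caps.filter (fun c => pvTier c == "sensitive"),
       u ++ caps.filter (fun c => pvTier c == "unknown")) := by
  induction caps generalizing r s u with
  | nil => simp
  | cons c cs ih =>
    simp only [List.foldl_cons, List.filter_cons]
    rw [pvTier_eq c]
    by_cases hs : is_sensitive_capability c = true
    · simp [hs, ih]
    · by_cases hr : is_regular_capability c = true
      · simp [hs, hr, ih]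
      · simp [hs, hr, ih]

-- ===== VERDICT (by name: the statement is the Claim_ definition above) =====
theorem classify_capabilities_spec : Claim_equal_classify_capabilities := by
  intro caps _
  show classify_capabilities caps = classify_capabilities_alt caps
  unfold classify_capabilities classify_capabilities_alt
  rw [foldA]
  simp
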